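-- pv_equiv track=rewrite | github.com/vitt0ri0/yalgorithms | luxcity/t2_numbers_and_operators/t2_numbers_operators.py | recursive_visualization
-- ===== SOURCE A (Python) =====
-- def recursive_visualization(parts: list, results: set = None, depth=0):
--     """
--     depth - we use it to count recursive depth for visualization purposes
--     """
--     if results is None:
--         results = set()
--
--     if len(parts) == 1:
--         results.add(parts[0])
--         return results
--
--     for i in range(len(parts)-1):
--         sum = parts[i] + str(depth) + parts[i+1]
--
--         new_parts = parts.copy()
--         new_parts.pop(i)
--         new_parts[i] = sum
--
--         recursive_visualization(new_parts, results, depth + 1)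
--
--     return results
-- ===== SOURCE B (Python) =====
-- def recursive_visualization(parts: list, results: set = None, depth=0):
--     """Iterative re-implementation: an explicit worklist (stack) replaces the
--     recursion, and merged lists are built by slicing instead of copy/pop/assign."""
--     if results is None:
--         results = set()
--
--     stack = [(list(parts), depth)]
--     while stack:
--         ps, d = stack.pop()
--         if len(ps) == 1:
--             results.add(ps[0])
--         else:
--             for i in reversed(range(len(ps) - 1)):
--                 stack.append((ps[:i] + [ps[i] + str(d) + ps[i + 1]] + ps[i + 2:], d + 1))
--     return results
-- ===== Notes on version B (the rewrite author's own statement) =====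
-- stated objective: alternative
-- what changed: Replaces A's recursion (which threads the results set through recursive calls and builds each merged list with copy/pop/index-assignment) by a single explicit worklist loop over a stack of (parts, depth) states, building merged lists by slicing.
import Mathlib
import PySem

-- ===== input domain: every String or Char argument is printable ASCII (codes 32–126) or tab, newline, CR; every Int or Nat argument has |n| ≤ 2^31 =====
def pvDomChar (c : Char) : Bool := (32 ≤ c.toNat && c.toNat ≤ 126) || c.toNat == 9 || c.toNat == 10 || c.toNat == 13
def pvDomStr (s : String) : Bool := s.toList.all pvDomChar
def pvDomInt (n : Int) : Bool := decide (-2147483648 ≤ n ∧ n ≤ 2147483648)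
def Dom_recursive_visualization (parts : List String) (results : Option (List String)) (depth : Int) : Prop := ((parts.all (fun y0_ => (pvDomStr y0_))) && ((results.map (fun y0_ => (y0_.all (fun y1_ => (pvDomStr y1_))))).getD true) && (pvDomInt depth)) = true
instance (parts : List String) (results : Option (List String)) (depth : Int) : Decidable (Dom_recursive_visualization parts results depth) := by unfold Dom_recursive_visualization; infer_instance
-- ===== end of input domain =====

-- B replaces A's recursion by an explicit worklist (stack) loop and builds merged
-- lists by slicing instead of copy/pop/assign; same return value, and like A it only
-- ADDS the produced strings to the caller's `results` set (same in-place mutation).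

-- ===== PORT A =====
-- sum = parts[i] + str(depth) + parts[i+1]; new_parts = parts.copy(); new_parts.pop(i);
-- new_parts[i] = sum  (i is drawn from range(len(parts)-1), so every index is in range)
def pvMergeA (parts : List String) (i : Int) (depth : Int) : List String :=
  let sum := PySem.List.pyGetD parts i "" ++ PySem.Int.toStr depth ++ PySem.List.pyGetD parts (i + 1) ""
  let new_parts := ((PySem.List.pop? parts i).map Prod.snd).getD parts
  PySem.List.pySetD new_parts i sum

-- closed form of pvMergeA for an in-range index (the port's termination cites the length corollary)
theorem pvMergeA_eq (parts : List String) (i depth : Int) (h0 : 0 ≤ i)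
    (h1 : i < (parts.length : Int) - 1) :
    pvMergeA parts i depth =
      parts.take i.toNat ++
        (PySem.List.pyGetD parts i "" ++ PySem.Int.toStr depth ++ PySem.List.pyGetD parts (i + 1) "") ::
          parts.drop (i.toNat + 2) := by
  have hi : i.toNat < parts.length := by omega
  have hi1 : i.toNat + 1 < parts.length := by omega
  have hcast : (i.toNat : Int) = i := Int.toNat_of_nonneg h0
  unfold pvMergeA
  rw [← hcast, PySem.List.pop?_natCast parts i.toNat hi]
  simp only [Option.map_some, Option.getD_some]
  rw [PySem.List.pySetD_of_nonneg _ _ (by omega)]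
  rw [List.eraseIdx_eq_take_drop_succ]
  have hl : (List.take i.toNat parts).length = i.toNat := by simp; omega
  rw [show ((i.toNat : Int)).toNat = i.toNat by omega]
  rw [List.set_append_right _ _ (by omega), hl, Nat.sub_self]
  rw [List.drop_eq_getElem_cons hi1, List.set_cons_zero, hcast]

theorem pvMergeA_length (parts : List String) (i depth : Int) (h0 : 0 ≤ i)
    (h1 : i < (parts.length : Int) - 1) :
    (pvMergeA parts i depth).length + 1 = parts.length := by
  rw [pvMergeA_eq parts i depth h0 h1]
  simp; omega

def pvGoA (parts : List String) (results : List String) (depth : Int) : List String :=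
  if parts.length = 1 then
    PySem.Set.add results (PySem.List.pyGetD parts 0 "")
  else
    (PySem.List.pyRange 0 ((parts.length : Int) - 1)).attach.foldl
      (fun res i => pvGoA (pvMergeA parts i.1 depth) res (depth + 1)) results
termination_by parts.length
decreasing_by
  rename_i i
  have hm := PySem.List.mem_pyRange_one.mp i.2
  have := pvMergeA_length parts i.1 depth hm.1 hm.2
  omega

def recursive_visualization (parts : List String) (results : Option (List String)) (depth : Int) : List String :=
  -- if results is None: results = set()
  let res := results.getD []
  pvGoA parts res depth

-- ===== PORT B =====
-- the tuple pushed for boundary i: (ps[:i] + [ps[i] + str(d) + ps[i+1]] + ps[i+2:], d + 1)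
def pvChildB (ps : List String) (d : Int) (i : Int) : List String × Int :=
  (PySem.List.slice ps none (some i) ++
     [PySem.List.pyGetD ps i "" ++ PySem.Int.toStr d ++ PySem.List.pyGetD ps (i + 1) ""] ++
       PySem.List.slice ps (some (i + 2)) none,
   d + 1)

theorem pvChildB_fst_eq (ps : List String) (d i : Int) (h0 : 0 ≤ i)
    (h1 : i < (ps.length : Int) - 1) :
    (pvChildB ps d i).1 =
      ps.take i.toNat ++
        (PySem.List.pyGetD ps i "" ++ PySem.Int.toStr d ++ PySem.List.pyGetD ps (i + 1) "") ::
          ps.drop (i.toNat + 2) := by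
  have hcast : (i.toNat : Int) = i := Int.toNat_of_nonneg h0
  have hcast2 : ((i.toNat + 2 : Nat) : Int) = i + 2 := by omega
  unfold pvChildB
  rw [← hcast, PySem.List.slice_to_natCast]
  rw [show (i.toNat : Int) + 2 = ((i.toNat + 2 : Nat) : Int) by omega, PySem.List.slice_from_natCast]
  simp [hcast]

theorem pvChildB_length (ps : List String) (d i : Int) (h0 : 0 ≤ i)
    (h1 : i < (ps.length : Int) - 1) :
    (pvChildB ps d i).1.length + 1 = ps.length := by
  rw [pvChildB_fst_eq ps d i h0 h1]
  simp; omega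

def pvStackMeasure (st : List (List String × Int)) : Nat :=
  (st.map (fun e => Nat.factorial e.1.length)).sum

theorem pvStackMeasure_append (a b : List (List String × Int)) :
    pvStackMeasure (a ++ b) = pvStackMeasure a + pvStackMeasure b := by
  simp [pvStackMeasure]

-- the pushed children of a non-singleton state weigh less than the state itself
theorem pvMeasure_children_lt (ps : List String) (d : Int) (h : ¬ ps.length = 1) :
    pvStackMeasure ((PySem.List.pyRange 0 ((ps.length : Int) - 1)).reverse.map
        (fun i => pvChildB ps d i)) < Nat.factorial ps.length := by
  rcases Nat.eq_zero_or_pos ps.length with h0 | hpos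
  · rw [PySem.List.pyRange_one_eq_nil (by omega)]
    simp [pvStackMeasure, h0]
  · have hn : 2 ≤ ps.length := by omega
    have hconst : ∀ e ∈ (PySem.List.pyRange 0 ((ps.length : Int) - 1)).reverse.map
        (fun i => pvChildB ps d i), Nat.factorial e.1.length = Nat.factorial (ps.length - 1) := by
      intro e he
      simp only [List.mem_map, List.mem_reverse] at he
      obtain ⟨i, hi, rfl⟩ := he
      have hm := PySem.List.mem_pyRange_one.mp hi
      have := pvChildB_length ps d i hm.1 hm.2
      congr 1; omega
    have hconst' : ∀ i ∈ (PySem.List.pyRange 0 ((ps.length : Int) - 1)).reverse,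
        ((fun e : List String × Int => Nat.factorial e.1.length) ∘ (fun i => pvChildB ps d i)) i
          = Nat.factorial (ps.length - 1) := by
      intro i hi
      exact hconst _ (List.mem_map.mpr ⟨i, hi, rfl⟩)
    unfold pvStackMeasure
    rw [List.map_map, List.map_congr_left hconst', List.map_const', List.sum_replicate,
      smul_eq_mul]
    simp only [List.length_reverse, PySem.List.length_pyRange_one]
    have : (((ps.length : Int) - 1 - 0)).toNat = ps.length - 1 := by omega
    rw [this]
    calc (ps.length - 1) * Nat.factorial (ps.length - 1)
        < ps.length * Nat.factorial (ps.length - 1) := by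
          have := Nat.factorial_pos (ps.length - 1)
          exact (Nat.mul_lt_mul_right this).mpr (by omega)
      _ = Nat.factorial ps.length := by
          conv_rhs => rw [show ps.length = (ps.length - 1) + 1 by omega, Nat.factorial_succ]
          rw [Nat.sub_add_cancel hpos]

def pvLoopB (stack : List (List String × Int)) (res : List String) : List String :=
  match stack with
  | [] => res
  | x :: xs =>
    -- ps, d = stack.pop()
    let e := (x :: xs).getLast (by simp)
    let st := (x :: xs).dropLast
    if e.1.length = 1 then
      pvLoopB st (PySem.Set.add res (PySem.List.pyGetD e.1 0 ""))
    else
      -- for i in reversed(range(len(ps) - 1)): stack.append(child i)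
      pvLoopB (st ++ (PySem.List.pyRange 0 ((e.1.length : Int) - 1)).reverse.map
        (fun i => pvChildB e.1 e.2 i)) res
termination_by pvStackMeasure stack
decreasing_by
  · have hx : (x :: xs) = (x :: xs).dropLast ++ [(x :: xs).getLast (by simp)] :=
      (List.dropLast_append_getLast (by simp)).symm
    conv_rhs => rw [hx]
    rw [pvStackMeasure_append]
    have := Nat.factorial_pos ((x :: xs).getLast (by simp)).1.length
    simp [pvStackMeasure]; omega
  · have hx : (x :: xs) = (x :: xs).dropLast ++ [(x :: xs).getLast (by simp)] :=
      (List.dropLast_append_getLast (by simp)).symm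
    conv_rhs => rw [hx]
    rw [pvStackMeasure_append, pvStackMeasure_append]
    have h1 := pvMeasure_children_lt ((x :: xs).getLast (by simp)).1 ((x :: xs).getLast (by simp)).2 (by assumption)
    simp only [pvStackMeasure, List.map_cons, List.map_nil, List.sum_cons, List.sum_nil] at *
    omega

def recursive_visualization_alt (parts : List String) (results : Option (List String)) (depth : Int) : List String :=
  -- if results is None: results = set()
  let res := results.getD []
  -- stack = [(list(parts), depth)]; while stack: ...
  pvLoopB [(parts, depth)] res

-- ===== PRECONDITION & SPEC =====
def Spec_recursive_visualization (parts : List String) (results : Option (List String)) (depth : Int) (out : List String) : Prop := out = recursive_visualization_alt parts results depth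
instance (parts : List String) (results : Option (List String)) (depth : Int) (out : List String) : Decidable (Spec_recursive_visualization parts results depth out) := by unfold Spec_recursive_visualization; infer_instance

-- ===== CLAIM (what is proved, stated in full; the proofs are below) =====
def Claim_equal_recursive_visualization : Prop := ∀ (parts : List String) (results : Option (List String)) (depth : Int), Dom_recursive_visualization parts results depth → Spec_recursive_visualization parts results depth (recursive_visualization parts results depth)

-- ===== LEMMAS AND PROOFS =====

-- one step of the loop, phrased on the stack's last element
theorem pvLoopB_concat (st : List (List String × Int)) (e : List String × Int) (res : List String) :
    pvLoopB (st ++ [e]) res =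
      if e.1.length = 1 then
        pvLoopB st (PySem.Set.add res (PySem.List.pyGetD e.1 0 ""))
      else
        pvLoopB (st ++ (PySem.List.pyRange 0 ((e.1.length : Int) - 1)).reverse.map
          (fun i => pvChildB e.1 e.2 i)) res := by
  cases st with
  | nil =>
    rw [List.nil_append]
    conv_lhs => rw [pvLoopB.eq_def]
    simp
  | cons y ys =>
    have h : (y :: ys) ++ [e] = y :: (ys ++ [e]) := by simp
    rw [h, pvLoopB]
    simp only [← h, List.getLast_concat, List.dropLast_concat]

-- processing a concatenated stack = processing the right part first
theorem pvLoopB_append (st' st : List (List String × Int)) (res : List String) :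
    pvLoopB (st ++ st') res = pvLoopB st (pvLoopB st' res) := by
  rcases List.eq_nil_or_concat st' with rfl | ⟨ys, e, hst⟩
  · rw [List.append_nil, pvLoopB]
  · rw [hst, List.concat_eq_append, ← List.append_assoc, pvLoopB_concat, pvLoopB_concat ys]
    split
    · rw [pvLoopB_append ys]
    · rw [List.append_assoc, pvLoopB_append (ys ++ _)]
termination_by pvStackMeasure st'
decreasing_by
  · rw [hst, List.concat_eq_append, pvStackMeasure_append, pvStackMeasure_append]
    have h1 := pvMeasure_children_lt e.1 e.2 (by assumption)
    have h2 : pvStackMeasure [e] = Nat.factorial e.1.length := by simp [pvStackMeasure]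
    omega
  · rw [hst, List.concat_eq_append, pvStackMeasure_append]
    have h2 : pvStackMeasure [e] = Nat.factorial e.1.length := by simp [pvStackMeasure]
    have := Nat.factorial_pos e.1.length
    omega

-- the worklist loop started on a single state computes A's recursion
theorem pvLoopB_single (n : Nat) (ps : List String) (hn : ps.length = n) (d : Int)
    (res : List String) : pvLoopB [(ps, d)] res = pvGoA ps res d := by
  induction n using Nat.strong_induction_on generalizing ps d res with
  | _ n IH =>
    have h1 : ([] : List (List String × Int)) ++ [(ps, d)] = [(ps, d)] := by simp
    rw [← h1, pvLoopB_concat, pvGoA]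
    by_cases hlen : ps.length = 1
    · simp [hlen, pvLoopB]
    · simp only [hlen, ite_false, List.nil_append]
      -- both sides now fold the children, in matching order
      have hfold : ∀ (is : List Int), (∀ i ∈ is, i ∈ PySem.List.pyRange 0 ((ps.length : Int) - 1)) →
          ∀ r : List String,
          pvLoopB (is.reverse.map (fun i => pvChildB ps d i)) r =
            is.foldl (fun r i => pvGoA (pvMergeA ps i d) r (d + 1)) r := by
        intro is
        induction is with
        | nil => intro _ r; rw [List.reverse_nil, List.map_nil, pvLoopB, List.foldl_nil]
        | cons i rest ih =>
          intro hmem r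
          have hi := PySem.List.mem_pyRange_one.mp (hmem i (by simp))
          have hchild : pvChildB ps d i = (pvMergeA ps i d, d + 1) := by
            have h2 := pvChildB_fst_eq ps d i hi.1 hi.2
            have h3 := pvMergeA_eq ps i d hi.1 hi.2
            unfold pvChildB at *
            simp only at h2 ⊢
            rw [h2, h3]
          have hlt : (pvMergeA ps i d).length < n := by
            have := pvMergeA_length ps i d hi.1 hi.2
            omega
          calc pvLoopB ((i :: rest).reverse.map (fun i => pvChildB ps d i)) r
              = pvLoopB (rest.reverse.map (fun i => pvChildB ps d i) ++ [pvChildB ps d i]) r := by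
                rw [List.reverse_cons, List.map_append, List.map_cons, List.map_nil]
            _ = pvLoopB (rest.reverse.map (fun i => pvChildB ps d i)) (pvLoopB [pvChildB ps d i] r) := by
                rw [pvLoopB_append]
            _ = pvLoopB (rest.reverse.map (fun i => pvChildB ps d i))
                  (pvGoA (pvMergeA ps i d) r (d + 1)) := by
                rw [hchild, IH _ hlt _ rfl]
            _ = (i :: rest).foldl (fun r i => pvGoA (pvMergeA ps i d) r (d + 1)) r := by
                rw [List.foldl_cons, ih (fun j hj => hmem j (by simp [hj]))]
      rw [List.foldl_attach
        (f := fun res i => pvGoA (pvMergeA ps i d) res (d + 1))]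
      exact hfold _ (fun i hi => hi) res

-- ===== VERDICT (by name: the statement is the Claim_ definition above) =====
theorem recursive_visualization_spec : Claim_equal_recursive_visualization := by
  intro parts results depth _
  unfold Spec_recursive_visualization recursive_visualization recursive_visualization_alt
  exact (pvLoopB_single parts.length parts rfl depth (results.getD [])).symm
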